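-- pv_equiv track=rewrite | github.com/qiqiguaitm/deepdive_kai0 | kai0/model_arithmetic/eval_kai0_mixed_1.py | split_indices
-- ===== SOURCE A (Python) =====
-- def split_indices(total, k):
--     base, extra = divmod(total, k)
--     result, s = [], 0
--     for i in range(k):
--         size = base + (1 if i < extra else 0)
--         result.append(list(range(s, s + size)))
--         s += size
--     return result
-- ===== SOURCE B (Python) =====
-- def split_indices(total, k):
--     base, extra = divmod(total, k)
--     # boundary table: b[i] = start of chunk i (= A's cumulative s after i chunks)
--     b = [i * base + min(i, extra) for i in range(k + 1)]
--     return [list(range(b[i], b[i + 1])) for i in range(k)]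
-- ===== Notes on version B (the rewrite author's own statement) =====
-- stated objective: alternative
-- what changed: Replaces A's accumulator-passing loop (running start s and per-iteration size branch) with a closed-form boundary table b[i] = i*base + min(i, extra) computed first, then a second pass slicing range(b[i], b[i+1]).
import Mathlib
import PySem

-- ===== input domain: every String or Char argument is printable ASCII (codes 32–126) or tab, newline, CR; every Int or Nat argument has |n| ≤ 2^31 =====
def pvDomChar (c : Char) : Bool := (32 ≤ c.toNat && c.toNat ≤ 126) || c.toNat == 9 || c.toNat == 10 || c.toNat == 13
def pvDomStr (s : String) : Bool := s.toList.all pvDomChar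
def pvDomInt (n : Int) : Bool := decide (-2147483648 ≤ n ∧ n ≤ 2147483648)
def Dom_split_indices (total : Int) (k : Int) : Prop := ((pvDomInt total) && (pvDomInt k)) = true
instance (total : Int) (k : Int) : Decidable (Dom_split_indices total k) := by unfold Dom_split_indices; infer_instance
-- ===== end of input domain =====

-- B replaces A's accumulator loop with a closed-form boundary table, then a second slicing pass (alternative decomposition, same cost).

-- ===== PORT A =====
def split_indices (total : Int) (k : Int) : List (List Int) :=
  let base := PySem.Int.floordiv total k
  let extra := PySem.Int.mod total k
  ((PySem.List.pyRange 0 k 1).foldl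
    (fun (acc : List (List Int) × Int) i =>
      let size := base + (if i < extra then (1 : Int) else 0)
      (acc.1 ++ [PySem.List.pyRange acc.2 (acc.2 + size) 1], acc.2 + size))
    ([], 0)).1

-- ===== PORT B =====
-- b[i] ported as pyGetD b i 0: within Pre_ every index used (0 ≤ i ≤ k with b of length k+1)
-- is in range, so this is exactly Python's b[i] there.
def split_indices_alt (total : Int) (k : Int) : List (List Int) :=
  let base := PySem.Int.floordiv total k
  let extra := PySem.Int.mod total k
  let b := (PySem.List.pyRange 0 (k + 1) 1).map (fun i => i * base + min i extra)
  (PySem.List.pyRange 0 k 1).map (fun i =>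
    PySem.List.pyRange (PySem.List.pyGetD b i 0) (PySem.List.pyGetD b (i + 1) 0) 1)

-- ===== PRECONDITION & SPEC =====
-- Pre_ excludes exactly k = 0, on which A's divmod raises ZeroDivisionError.
def Pre_split_indices (total : Int) (k : Int) : Prop := k ≠ 0
instance (total : Int) (k : Int) : Decidable (Pre_split_indices total k) := by unfold Pre_split_indices; infer_instance
def pvWitness_split_indices : Int × Int := (10, 3)
def Spec_split_indices (total : Int) (k : Int) (out : List (List Int)) : Prop := out = split_indices_alt total k
instance (total : Int) (k : Int) (out : List (List Int)) : Decidable (Spec_split_indices total k out) := by unfold Spec_split_indices; infer_instance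

-- ===== CLAIM (what is proved, stated in full; the proofs are below) =====
def Claim_equal_split_indices : Prop := ∀ (total : Int) (k : Int), Dom_split_indices total k → Pre_split_indices total k → Spec_split_indices total k (split_indices total k)

-- ===== LEMMAS AND PROOFS =====

-- boundary function: B's table entry, and A's cumulative start
def pvBd (base extra i : Int) : Int := i * base + min i extra

theorem pvBd_succ (base extra i : Int) :
    pvBd base extra (i + 1) = pvBd base extra i + (base + (if i < extra then (1 : Int) else 0)) := by
  unfold pvBd
  rcases lt_or_ge i extra with h | h
  · rw [if_pos h, min_eq_left h.le, min_eq_left (by omega)]; ring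
  · rw [if_neg (not_lt.mpr h), min_eq_right h, min_eq_right (by omega)]; ring

-- loop invariant: A's fold from start pvBd a appends exactly the boundary-table chunks
theorem pvFold_inv (base extra : Int) (a b : Int) (hab : a ≤ b) (res : List (List Int)) :
    (PySem.List.pyRange a b 1).foldl
      (fun (acc : List (List Int) × Int) i =>
        let size := base + (if i < extra then (1 : Int) else 0)
        (acc.1 ++ [PySem.List.pyRange acc.2 (acc.2 + size) 1], acc.2 + size))
      (res, pvBd base extra a)
    = (res ++ (PySem.List.pyRange a b 1).map
        (fun i => PySem.List.pyRange (pvBd base extra i) (pvBd base extra (i + 1)) 1),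
       pvBd base extra b) := by
  generalize hm : (b - a).toNat = m
  induction m generalizing a res with
  | zero =>
    have hba : b ≤ a := by omega
    have hab' : a = b := le_antisymm hab hba
    subst hab'
    simp [PySem.List.pyRange_one_eq_nil le_rfl]
  | succ m ih =>
    have hlt : a < b := by omega
    rw [PySem.List.pyRange_one_cons hlt]
    simp only [List.foldl_cons, List.map_cons]
    rw [← pvBd_succ base extra a]
    rw [ih (a + 1) (by omega) _ (by omega)]
    simp

-- B's pyGetD lookups reduce to pvBd on in-range indices
theorem pvB_lookup (base extra k i : Int) (h0 : 0 ≤ i) (hk : i < k + 1) :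
    PySem.List.pyGetD ((PySem.List.pyRange 0 (k + 1) 1).map (fun j => j * base + min j extra)) i 0
      = pvBd base extra i := by
  have := PySem.List.pyGetD_map_pyRange_of_nonneg (fun j => j * base + min j extra) (k + 1) i 0 h0 hk
  simpa [pvBd] using this

-- ===== VERDICT (by name: the statement is the Claim_ definition above) =====
theorem split_indices_spec : Claim_equal_split_indices := by
  intro total k _ _
  unfold Spec_split_indices split_indices split_indices_alt
  simp only []
  by_cases hk : k ≤ 0
  · rw [PySem.List.pyRange_one_eq_nil hk]
    simp
  · replace hk : 0 < k := by omega
    have hmod : 0 ≤ PySem.Int.mod total k := by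
      rw [PySem.Int.mod_eq_emod_of_pos hk]; exact Int.emod_nonneg _ (by omega)
    have h0 : pvBd (PySem.Int.floordiv total k) (PySem.Int.mod total k) 0 = 0 := by
      unfold pvBd; rw [min_eq_left hmod]; ring
    have := pvFold_inv (PySem.Int.floordiv total k) (PySem.Int.mod total k) 0 k hk.le []
    rw [h0] at this
    rw [this]
    simp only [List.nil_append]
    apply List.map_congr_left
    intro i hi
    have hm := (PySem.List.mem_pyRange_one).1 hi
    rw [pvB_lookup _ _ _ _ hm.1 (by omega), pvB_lookup _ _ _ _ (by omega) (by omega)]
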